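-- pv_equiv track=rewrite | github.com/JUNYOUNG31/-Algorithm | Baekjoon/03_Gold/17140-이차원_배열과_연산.py | make_row
-- ===== SOURCE A (Python) =====
-- from collections import defaultdict
--
-- def make_row(arr):
--     cnt_num = defaultdict(int)
--     for num in (arr):
--         if num == 0:
--             continue
--         cnt_num[num] += 1
--
--     cnt_num_list = []
--     for num, cnt in cnt_num.items():
--         cnt_num_list.append((num, cnt))
--
--     cnt_num_list.sort(key=lambda x: (x[1], x[0]))  # 정렬하기
--
--     new_row = []
--     for i in range(len(cnt_num_list)):     # 새로운 배열에
--         new_row.append(cnt_num_list[i][0])    # num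
--         new_row.append(cnt_num_list[i][1])    # cnt
--
--     return new_row[:100] # 100개까지만 가져오기
-- ===== SOURCE B (Python) =====
-- def make_row(arr):
--     cnt = {}
--     for x in arr:
--         if x != 0:
--             cnt[x] = cnt.get(x, 0) + 1
--     out = []
--     for c in sorted(set(cnt.values())):
--         for v in sorted(v for v, k in cnt.items() if k == c):
--             out.append(v)
--             out.append(c)
--     return out[:100]
-- ===== Notes on version B (the rewrite author's own statement) =====
-- stated objective: alternative
-- what changed: Replaces A's single comparison sort of (value,count) pairs under a lambda (count,value) tuple key by a count-major bucket traversal: sort the distinct counts, then for each count sort the values having that count and emit value then count; no tuple-keyed sort of the pairs is performed.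
import Mathlib
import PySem

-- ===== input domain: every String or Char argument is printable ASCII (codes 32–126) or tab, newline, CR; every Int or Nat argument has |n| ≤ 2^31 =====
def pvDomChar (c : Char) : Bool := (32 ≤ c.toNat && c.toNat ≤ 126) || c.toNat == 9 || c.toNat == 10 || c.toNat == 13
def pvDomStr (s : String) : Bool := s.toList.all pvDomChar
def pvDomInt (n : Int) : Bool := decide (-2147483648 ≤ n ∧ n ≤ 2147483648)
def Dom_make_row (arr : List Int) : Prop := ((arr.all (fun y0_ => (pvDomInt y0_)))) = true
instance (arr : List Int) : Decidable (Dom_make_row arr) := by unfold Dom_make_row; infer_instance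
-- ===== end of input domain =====

-- B replaces A's single (count,value)-keyed sort of the counter items by a count-major bucket
-- traversal (ascending distinct counts, ascending values inside each count); alternative, not faster.

-- ===== PORT A =====
def make_row (arr : List Int) : List Int :=
  let cnt_num : PySem.Dict Int Int :=
    arr.foldl (fun d num => if num = 0 then d else d.modify num 0 (fun x => x + 1)) PySem.Dict.empty
  let cnt_num_list : List (Int × Int) :=
    cnt_num.items.foldl (fun acc p => acc ++ [(p.1, p.2)]) []
  let sorted_list := PySem.List.sorted2 cnt_num_list (fun x => x.2) (fun x => x.1)
  -- indexing sorted_list[i] never fails for i in range(len(sorted_list)); pyGetD with a dummy default is exact there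
  let new_row : List Int :=
    (PySem.List.pyRange 0 (PySem.List.len sorted_list)).foldl
      (fun acc i => (acc ++ [(PySem.List.pyGetD sorted_list i (0, 0)).1])
                    ++ [(PySem.List.pyGetD sorted_list i (0, 0)).2]) []
  PySem.List.slice new_row none (some 100)

-- ===== PORT B =====
def make_row_alt (arr : List Int) : List Int :=
  let cnt : PySem.Dict Int Int :=
    arr.foldl (fun d x => if x ≠ 0 then d.insert x (d.getD x 0 + 1) else d) PySem.Dict.empty
  let out : List Int :=
    (PySem.List.sorted (PySem.Set.ofList cnt.values) (fun c => c)).foldl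
      (fun acc c =>
        (PySem.List.sorted ((cnt.items.filter (fun p => p.2 == c)).map (fun p => p.1)) (fun v => v)).foldl
          (fun acc2 v => (acc2 ++ [v]) ++ [c]) acc) []
  PySem.List.slice out none (some 100)

-- ===== PRECONDITION & SPEC =====
def Spec_make_row (arr : List Int) (out : List Int) : Prop := out = make_row_alt arr
instance (arr : List Int) (out : List Int) : Decidable (Spec_make_row arr out) := by unfold Spec_make_row; infer_instance

-- ===== CLAIM (what is proved, stated in full; the proofs are below) =====
def Claim_equal_make_row : Prop := ∀ (arr : List Int), Dom_make_row arr → Spec_make_row arr (make_row arr)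

-- ===== LEMMAS AND PROOFS =====

-- A's counting loop with the `continue` equals the plain counter of the nonzero elements.
theorem foldl_if_filter (arr : List Int) (d : PySem.Dict Int Int) :
    arr.foldl (fun d num => if num = 0 then d else d.modify num 0 (fun x => x + 1)) d
      = (arr.filter (fun x => decide (x ≠ 0))).foldl (fun d num => d.modify num 0 (fun x => x + 1)) d := by
  induction arr generalizing d with
  | nil => rfl
  | cons x t ih =>
      by_cases hx : x = 0 <;> simp [hx, ih]

theorem foldl_append_pairs (l : List (Int × Int)) (acc : List (Int × Int)) :
    l.foldl (fun acc p => acc ++ [(p.1, p.2)]) acc = acc ++ l := by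
  induction l generalizing acc with
  | nil => simp
  | cons x t ih => simp [ih]

theorem foldl_two_appends (f g : Int × Int → Int) (l : List (Int × Int)) (acc : List Int) :
    l.foldl (fun acc p => (acc ++ [f p]) ++ [g p]) acc = acc ++ l.flatMap (fun p => [f p, g p]) := by
  induction l generalizing acc with
  | nil => simp
  | cons x t ih => simp [List.flatMap]

-- sorted with a two-component key is sorted with the lexicographic key.
theorem sorted2_eq_sorted_toLex {α : Type} (xs : List α) (k1 k2 : α → Int) :
    PySem.List.sorted2 xs k1 k2 = PySem.List.sorted xs (fun x => toLex (k1 x, k2 x)) := by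
  show List.foldl _ [] xs = List.foldl _ [] xs
  have hbefore : (fun a b => decide (k1 a < k1 b) || (!decide (k1 b < k1 a) && decide (k2 a < k2 b)))
      = (fun a b => decide ((toLex (k1 a, k2 a) : Lex (Int × Int)) < toLex (k1 b, k2 b))) := by
    funext a b
    rw [Bool.eq_iff_iff]
    simp only [Bool.or_eq_true, Bool.and_eq_true, Bool.not_eq_true',
      decide_eq_true_eq, decide_eq_false_iff_not, Prod.Lex.lt_iff, ofLex_toLex]
    omega
  rw [hbefore]

theorem sorted2_eq_of_perm_of_pairwise {α : Type} (xs ys : List α) (k1 k2 : α → Int)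
    (hp : ys.Perm xs)
    (hpw : ys.Pairwise (fun a b => (toLex (k1 a, k2 a) : Lex (Int × Int)) < toLex (k1 b, k2 b))) :
    PySem.List.sorted2 xs k1 k2 = ys := by
  rw [sorted2_eq_sorted_toLex]
  exact PySem.List.sorted_eq_of_perm_of_pairwise_lt _ _ _ hp hpw

-- Partitioning a pair list by its distinct second components is a permutation of it.
theorem partition_perm (cs : List Int) (L : List (Int × Int))
    (hnd : cs.Nodup) (hmem : ∀ p ∈ L, p.2 ∈ cs) :
    (cs.flatMap (fun c => L.filter (fun p => p.2 == c))).Perm L := by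
  induction cs generalizing L with
  | nil =>
      cases L with
      | nil => simp
      | cons p t => exact absurd (hmem p (by simp)) (by simp)
  | cons c cs' ih =>
      have hc : c ∉ cs' := (List.nodup_cons.mp hnd).1
      have hnd' : cs'.Nodup := (List.nodup_cons.mp hnd).2
      set L' := L.filter (fun p => !(p.2 == c)) with hL'
      have hstep : ∀ c' ∈ cs', L.filter (fun p => p.2 == c') = L'.filter (fun p => p.2 == c') := by
        intro c' hc'
        have hne : c' ≠ c := by rintro rfl; exact hc hc'
        rw [hL', List.filter_filter]
        apply List.filter_congr
        intro p _
        by_cases hp : p.2 = c'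
        · simp [hp, hne]
        · simp [hp]
      have hflat : cs'.flatMap (fun c' => L.filter (fun p => p.2 == c'))
          = cs'.flatMap (fun c' => L'.filter (fun p => p.2 == c')) :=
        List.flatMap_congr hstep
      have hmem' : ∀ p ∈ L', p.2 ∈ cs' := by
        intro p hp
        have h1 := List.mem_filter.mp hp
        have h2 := hmem p h1.1
        have h3 : p.2 ≠ c := by simpa using h1.2
        simpa [h3] using h2
      have h0 : ((c :: cs').flatMap (fun c => L.filter (fun p => p.2 == c)))
          = L.filter (fun p => p.2 == c) ++ cs'.flatMap (fun c' => L'.filter (fun p => p.2 == c')) := by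
        rw [List.flatMap_cons, hflat]
      rw [h0]
      exact (((List.Perm.refl (L.filter (fun p => p.2 == c))).append (ih L' hnd' hmem')).trans
        (List.filter_append_perm (fun p => p.2 == c) L))

-- sorting a duplicate-free Int list yields a strictly increasing list.
theorem sorted_id_pairwise_lt (l : List Int) (h : l.Nodup) :
    (PySem.List.sorted l (fun x => x)).Pairwise (fun a b => a < b) := by
  have hle : (PySem.List.sorted l (fun x => x)).Pairwise (fun a b => a ≤ b) :=
    PySem.List.sorted_pairwise l (fun x => x)
  have hnd : (PySem.List.sorted l (fun x => x)).Nodup :=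
    ((PySem.List.sorted_perm l (fun x => x) false).nodup_iff).mpr h
  refine (hle.and hnd).imp ?_
  intro a b ⟨h1, h2⟩
  exact lt_of_le_of_ne h1 h2

-- The central fact: the count-major bucket traversal of a pair list with distinct first
-- components enumerates exactly A's (count,value)-keyed sort of that list.
theorem buckets_eq_sorted2 (L : List (Int × Int)) (hfst : (L.map Prod.fst).Nodup) :
    (PySem.List.sorted (PySem.Set.ofList (L.map Prod.snd)) (fun c => c)).flatMap
        (fun c => (PySem.List.sorted ((L.filter (fun p => p.2 == c)).map (fun p => p.1)) (fun v => v)).map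
          (fun v => (v, c)))
      = PySem.List.sorted2 L (fun x => x.2) (fun x => x.1) := by
  set cs := PySem.List.sorted (PySem.Set.ofList (L.map Prod.snd)) (fun c => c) with hcs
  have hcsperm : cs.Perm (PySem.Set.ofList (L.map Prod.snd)) := PySem.List.sorted_perm _ _ _
  have hcsnd : cs.Nodup := hcsperm.nodup_iff.mpr (PySem.Set.nodup_ofList _)
  have hcslt : cs.Pairwise (fun a b => a < b) :=
    sorted_id_pairwise_lt _ (PySem.Set.nodup_ofList _)
  symm
  apply sorted2_eq_of_perm_of_pairwise
  · -- permutation with L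
    have h1 : ∀ c ∈ cs,
        ((PySem.List.sorted ((L.filter (fun p => p.2 == c)).map (fun p => p.1)) (fun v => v)).map
          (fun v => (v, c))).Perm (L.filter (fun p => p.2 == c)) := by
      intro c _
      have hs : (PySem.List.sorted ((L.filter (fun p => p.2 == c)).map (fun p => p.1)) (fun v => v)).Perm
          ((L.filter (fun p => p.2 == c)).map (fun p => p.1)) := PySem.List.sorted_perm _ _ _
      have h2 := hs.map (fun v => (v, c))
      rw [List.map_map] at h2
      have h3 : (L.filter (fun p => p.2 == c)).map ((fun v => (v, c)) ∘ fun p => p.1)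
          = L.filter (fun p => p.2 == c) := by
        conv_rhs => rw [← List.map_id (L.filter (fun p => p.2 == c))]
        apply List.map_congr_left
        intro p hp
        have hpc : p.2 = c := by simpa using (List.mem_filter.mp hp).2
        simp [Function.comp, ← hpc]
      rw [h3] at h2
      exact h2
    have hmem : ∀ p ∈ L, p.2 ∈ cs := by
      intro p hp
      rw [hcs]
      have : p.2 ∈ L.map Prod.snd := List.mem_map_of_mem hp
      exact (hcsperm.mem_iff).mpr ((PySem.Set.mem_ofList _ _).mpr this)
    exact (List.Perm.flatMap_left cs h1).trans (partition_perm cs L hcsnd hmem)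
  · -- pairwise strict lexicographic (count, value) order
    rw [List.pairwise_flatMap]
    constructor
    · intro c _
      rw [List.pairwise_map]
      have hFnd : ((L.filter (fun p => p.2 == c)).map (fun p => p.1)).Nodup := by
        have hsub : ((L.filter (fun p => p.2 == c)).map (fun p => p.1)).Sublist (L.map Prod.fst) :=
          List.Sublist.map _ List.filter_sublist
        exact List.Pairwise.sublist hsub hfst
      have := sorted_id_pairwise_lt _ hFnd
      refine this.imp ?_
      intro a b hab
      simp only [Prod.Lex.lt_iff, ofLex_toLex]
      exact Or.inr ⟨trivial, hab⟩
    · refine hcslt.imp ?_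
      intro c c' hcc x hx y hy
      obtain ⟨v, _, rfl⟩ := List.mem_map.mp hx
      obtain ⟨w, _, rfl⟩ := List.mem_map.mp hy
      simp only [Prod.Lex.lt_iff, ofLex_toLex]
      exact Or.inl hcc

-- B's nested emission loops flatten every bucket as [value, count].
theorem inner_fold (c : Int) (l : List Int) (acc : List Int) :
    l.foldl (fun acc2 v => (acc2 ++ [v]) ++ [c]) acc = acc ++ l.flatMap (fun v => [v, c]) := by
  have h := PySem.List.foldl_congr_mem' l (fun acc2 v => (acc2 ++ [v]) ++ [c])
    (fun acc2 v => acc2 ++ [v, c]) acc (by intro v _ a; simp)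
  rw [h, PySem.List.foldl_append_eq_flatMap]

-- A's index loop over range(len(...)) collects value then count of every pair.
theorem range_loop (xs : List (Int × Int)) :
    (PySem.List.pyRange 0 (PySem.List.len xs)).foldl
      (fun acc i => (acc ++ [(PySem.List.pyGetD xs i (0, 0)).1])
                    ++ [(PySem.List.pyGetD xs i (0, 0)).2]) []
      = xs.flatMap (fun p => [p.1, p.2]) := by
  have h := PySem.List.foldl_pyRange_pyGetD xs (0, 0)
    (fun acc x => (acc ++ [x.1]) ++ [x.2]) [] (a := 0) le_rfl
  simpa using h.trans (by simpa using foldl_two_appends (fun p => p.1) (fun p => p.2) xs [])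

-- ===== VERDICT (by name: the statement is the Claim_ definition above) =====
theorem make_row_spec : Claim_equal_make_row := by
  intro arr _
  unfold Spec_make_row make_row make_row_alt
  simp only []
  set N := arr.filter (fun x => decide (x ≠ 0)) with hN
  have hA : arr.foldl (fun d num => if num = 0 then d else d.modify num 0 (fun x => x + 1)) PySem.Dict.empty
      = PySem.Dict.counter N := by
    rw [foldl_if_filter]; rfl
  have hB : arr.foldl (fun d x => if x ≠ 0 then d.insert x (d.getD x 0 + 1) else d) PySem.Dict.empty
      = PySem.Dict.counter N := by
    have h := PySem.List.foldl_ite_eq_foldl_filter (fun x : Int => x ≠ 0)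
      (fun (d : PySem.Dict Int Int) x => d.insert x (d.getD x 0 + 1)) arr PySem.Dict.empty
    rw [h, ← hN, PySem.Dict.foldl_insert_getD_add_one_eq_counter]
  rw [hA, hB]
  set L := (PySem.Dict.counter N).items with hL
  have hLitems : L = (PySem.Set.ofList N).map (fun k => (k, (N.count k : Int))) := by
    rw [hL, PySem.Dict.items_counter]
  have hfst : (L.map Prod.fst).Nodup := by
    rw [hLitems, List.map_map]
    have : ((fun p => p.1) ∘ fun k => (k, (N.count k : Int))) = id := by funext k; rfl
    rw [this, List.map_id]
    exact PySem.Set.nodup_ofList N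
  have hvals : (PySem.Dict.counter N).values = L.map Prod.snd := rfl
  rw [foldl_append_pairs, List.nil_append]
  have hApairs : L.foldl (fun acc p => acc ++ [(p.1, p.2)]) [] = L := by
    rw [foldl_append_pairs, List.nil_append]
  rw [range_loop]
  -- rewrite B's nested loops into a flatMap over the bucket pairs
  have hout :
      (PySem.List.sorted (PySem.Set.ofList ((PySem.Dict.counter N).values)) (fun c => c)).foldl
        (fun acc c =>
          (PySem.List.sorted ((L.filter (fun p => p.2 == c)).map (fun p => p.1)) (fun v => v)).foldl
            (fun acc2 v => (acc2 ++ [v]) ++ [c]) acc) []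
      = ((PySem.List.sorted (PySem.Set.ofList (L.map Prod.snd)) (fun c => c)).flatMap
          (fun c => (PySem.List.sorted ((L.filter (fun p => p.2 == c)).map (fun p => p.1)) (fun v => v)).map
            (fun v => (v, c)))).flatMap (fun p => [p.1, p.2]) := by
    rw [hvals]
    have hstep := PySem.List.foldl_congr_mem'
      (PySem.List.sorted (PySem.Set.ofList (L.map Prod.snd)) (fun c => c))
      (fun acc c =>
        (PySem.List.sorted ((L.filter (fun p => p.2 == c)).map (fun p => p.1)) (fun v => v)).foldl
          (fun acc2 v => (acc2 ++ [v]) ++ [c]) acc)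
      (fun acc c => acc ++
        (PySem.List.sorted ((L.filter (fun p => p.2 == c)).map (fun p => p.1)) (fun v => v)).flatMap
          (fun v => [v, c]))
      [] (by intro c _ acc; exact inner_fold c _ acc)
    rw [hstep, PySem.List.foldl_append_eq_flatMap, List.nil_append, List.flatMap_assoc]
    apply List.flatMap_congr
    intro c _
    rw [List.flatMap_map]
  rw [hout, buckets_eq_sorted2 L hfst]
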